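-- pv_equiv track=rewrite | github.com/dasamerica/ct208 | aula_2805_maior_elemento/ct208_maior_menor_segundo_elemento_recursivo.py | maior_menor_trocas
-- ===== SOURCE A (Python) =====
-- def maior_menor_trocas (elements):
--   me = elements[0]
--   ma = elements[0]
--   ma_2 = elements[0]
--   me_2 = elements[0]
--   n = 1
--   t= [0,0,0,0]
--   while n < (len(elements)):
--     # conta trocas maior
--     if ma < elements[n]:
--        ma_2 = ma
--        ma = elements[n]
--        t[0]+=1
--        t[2]+=1
--     # conta trocas menor
--     if me > elements [n]:
--        me_2 = me
--        me = elements[n]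
--        t[1]+=1
--        t[3]+=1
--     n+=1
--   return (t)
-- ===== SOURCE B (Python) =====
-- def maior_menor_trocas(elements):
--     maxs = [elements[0]]
--     mins = [elements[0]]
--     for x in elements[1:]:
--         maxs.append(maxs[-1] if maxs[-1] > x else x)
--         mins.append(mins[-1] if mins[-1] < x else x)
--     up = sum(1 for a, b in zip(maxs, maxs[1:]) if b > a)
--     down = sum(1 for a, b in zip(mins, mins[1:]) if b < a)
--     return [up, down, up, down]
-- ===== Notes on version B (the rewrite author's own statement) =====
-- stated objective: alternative
-- what changed: Instead of one while loop mutating max/min/second-place variables and a counter list in place, B materialises the prefix-maxima and prefix-minima scans and counts the positions where each scan strictly changes.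
import Mathlib
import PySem

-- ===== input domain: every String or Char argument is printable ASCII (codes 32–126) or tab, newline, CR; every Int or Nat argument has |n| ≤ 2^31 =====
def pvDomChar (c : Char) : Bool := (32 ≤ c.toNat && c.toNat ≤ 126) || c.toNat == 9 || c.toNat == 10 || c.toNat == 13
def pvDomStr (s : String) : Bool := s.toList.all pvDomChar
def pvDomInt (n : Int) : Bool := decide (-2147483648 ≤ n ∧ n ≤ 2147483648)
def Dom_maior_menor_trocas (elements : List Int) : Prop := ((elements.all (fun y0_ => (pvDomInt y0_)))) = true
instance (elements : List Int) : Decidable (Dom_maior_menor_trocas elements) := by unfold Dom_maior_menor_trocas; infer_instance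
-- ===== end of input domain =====

-- B replaces A's single stateful while-loop with explicit prefix-max/min scans plus a count of
-- strict changes (alternative decomposition, same O(n) cost); Pre_ excludes the empty list, on
-- which A raises IndexError.


-- ===== PORT A =====
-- state = (me, ma, ma_2, me_2, t0, t1, t2, t3); one while-loop step of A
def pvStepA (st : Int × Int × Int × Int × Int × Int × Int × Int) (x : Int) :
    Int × Int × Int × Int × Int × Int × Int × Int :=
  match st with
  | (me, ma, ma2, me2, t0, t1, t2, t3) =>
    let (ma2, ma, t0, t2) := if ma < x then (ma, x, t0 + 1, t2 + 1) else (ma2, ma, t0, t2)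
    let (me2, me, t1, t3) := if me > x then (me, x, t1 + 1, t3 + 1) else (me2, me, t1, t3)
    (me, ma, ma2, me2, t0, t1, t2, t3)

def maior_menor_trocas (elements : List Int) : List Int :=
  match elements with
  | [] => []   -- unreachable under Pre_: Python A raises IndexError indexing the first element
  | e :: rest =>
    let s := rest.foldl pvStepA (e, e, e, e, 0, 0, 0, 0)
    [s.2.2.2.2.1, s.2.2.2.2.2.1, s.2.2.2.2.2.2.1, s.2.2.2.2.2.2.2]

-- ===== PORT B =====
-- one body of B's for-loop: append the new running max / running min
def pvStepB (st : List Int × List Int) (x : Int) : List Int × List Int :=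
  (st.1 ++ [if st.1.getLast! > x then st.1.getLast! else x],
   st.2 ++ [if st.2.getLast! < x then st.2.getLast! else x])

def maior_menor_trocas_alt (elements : List Int) : List Int :=
  match elements with
  | [] => []   -- unreachable under Pre_: Python A raises IndexError indexing the first element
  | e :: rest =>
    let (maxs, mins) := rest.foldl pvStepB ([e], [e])
    let up : Int := ((maxs.zip (maxs.drop 1)).countP (fun p => decide (p.1 < p.2)) : Nat)
    let down : Int := ((mins.zip (mins.drop 1)).countP (fun p => decide (p.2 < p.1)) : Nat)
    [up, down, up, down]

-- ===== PRECONDITION & SPEC =====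
-- A unconditionally indexes the first element, so it raises IndexError on the empty list; excluded.
def Pre_maior_menor_trocas (elements : List Int) : Prop := elements ≠ []
instance (elements : List Int) : Decidable (Pre_maior_menor_trocas elements) := by
  unfold Pre_maior_menor_trocas; infer_instance
def pvWitness_maior_menor_trocas : List Int := [3, 1, 4]

def Spec_maior_menor_trocas (elements : List Int) (out : List Int) : Prop := out = maior_menor_trocas_alt elements
instance (elements : List Int) (out : List Int) : Decidable (Spec_maior_menor_trocas elements out) := by unfold Spec_maior_menor_trocas; infer_instance

-- ===== CLAIM (what is proved, stated in full; the proofs are below) =====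
def Claim_equal_maior_menor_trocas : Prop := ∀ (elements : List Int), Dom_maior_menor_trocas elements → Pre_maior_menor_trocas elements → Spec_maior_menor_trocas elements (maior_menor_trocas elements)

-- ===== LEMMAS AND PROOFS =====

-- reference counts: number of strict running-max increases / running-min decreases
def pvUp (m : Int) : List Int → Int
  | [] => 0
  | x :: xs => if m < x then 1 + pvUp x xs else pvUp m xs

def pvDown (m : Int) : List Int → Int
  | [] => 0
  | x :: xs => if m > x then 1 + pvDown x xs else pvDown m xs

def pvRunMax (m : Int) : List Int → Int
  | [] => m
  | x :: xs => pvRunMax (if m < x then x else m) xs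

def pvRunMin (m : Int) : List Int → Int
  | [] => m
  | x :: xs => pvRunMin (if m > x then x else m) xs

-- the tails of B's two scans
def pvSMax (m : Int) : List Int → List Int
  | [] => []
  | x :: xs => (if m > x then m else x) :: pvSMax (if m > x then m else x) xs

def pvSMin (m : Int) : List Int → List Int
  | [] => []
  | x :: xs => (if m < x then m else x) :: pvSMin (if m < x then m else x) xs

lemma A_fold_inv (rest : List Int) : ∀ me ma ma2 me2 t0 t1 t2 t3 : Int, ∃ a b : Int,
    rest.foldl pvStepA (me, ma, ma2, me2, t0, t1, t2, t3)
      = (pvRunMin me rest, pvRunMax ma rest, a, b,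
         t0 + pvUp ma rest, t1 + pvDown me rest, t2 + pvUp ma rest, t3 + pvDown me rest) := by
  induction rest with
  | nil => intro me ma ma2 me2 t0 t1 t2 t3; exact ⟨ma2, me2, by simp [pvRunMin, pvRunMax, pvUp, pvDown]⟩
  | cons x xs ih =>
    intro me ma ma2 me2 t0 t1 t2 t3
    simp only [List.foldl_cons, pvStepA]
    by_cases hma : ma < x <;> by_cases hme : me > x <;>
      simp only [hma, hme, if_pos] <;>
      · obtain ⟨a, b, hab⟩ := ih _ _ _ _ _ _ _ _
        refine ⟨a, b, ?_⟩
        rw [hab]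
        simp [pvRunMin, pvRunMax, pvUp, pvDown, hma, hme]
        all_goals (and_intros <;> (first | trivial | omega))

lemma B_fold_inv (rest : List Int) :
    ∀ accM accm : List Int, accM ≠ [] → accm ≠ [] →
    rest.foldl pvStepB (accM, accm)
      = (accM ++ pvSMax accM.getLast! rest, accm ++ pvSMin accm.getLast! rest) := by
  induction rest with
  | nil => intro accM accm _ _; simp [pvSMax, pvSMin]
  | cons x xs ih =>
    intro accM accm hM hm
    simp only [List.foldl_cons, pvStepB]
    rw [ih (accM ++ [if accM.getLast! > x then accM.getLast! else x])
           (accm ++ [if accm.getLast! < x then accm.getLast! else x])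
           (by simp) (by simp)]
    simp [pvSMax, pvSMin]

lemma countAdjUp (rest : List Int) : ∀ m : Int,
    ((((m :: pvSMax m rest).zip (pvSMax m rest)).countP
        (fun p => decide (p.1 < p.2)) : Nat) : Int) = pvUp m rest := by
  induction rest with
  | nil => intro m; simp [pvSMax, pvUp]
  | cons x xs ih =>
    intro m
    have h1 := ih m
    have h2 := ih x
    simp only [pvSMax, pvUp, List.zip_cons_cons, List.countP_cons]
    split_ifs with ha hb <;> simp only [decide_eq_true_eq] at *
    all_goals try (push_cast; omega)
    have hmx : m = x := by omega
    subst hmx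
    push_cast
    omega

lemma countAdjDown (rest : List Int) : ∀ m : Int,
    ((((m :: pvSMin m rest).zip (pvSMin m rest)).countP
        (fun p => decide (p.2 < p.1)) : Nat) : Int) = pvDown m rest := by
  induction rest with
  | nil => intro m; simp [pvSMin, pvDown]
  | cons x xs ih =>
    intro m
    have h1 := ih m
    have h2 := ih x
    simp only [pvSMin, pvDown, List.zip_cons_cons, List.countP_cons]
    split_ifs with ha hb <;> simp only [decide_eq_true_eq] at *
    all_goals try (push_cast; omega)
    have hmx : m = x := by omega
    subst hmx
    push_cast
    omega

lemma B_closed (e : Int) (rest : List Int) :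
    maior_menor_trocas_alt (e :: rest)
      = [pvUp e rest, pvDown e rest, pvUp e rest, pvDown e rest] := by
  simp only [maior_menor_trocas_alt]
  rw [B_fold_inv rest [e] [e] (by simp) (by simp)]
  rw [show ([e] : List Int).getLast! = e from rfl]
  simp only [List.singleton_append, List.drop_one, List.tail_cons]
  rw [countAdjUp rest e, countAdjDown rest e]

lemma A_closed (e : Int) (rest : List Int) :
    maior_menor_trocas (e :: rest)
      = [pvUp e rest, pvDown e rest, pvUp e rest, pvDown e rest] := by
  simp only [maior_menor_trocas]
  obtain ⟨a, b, h⟩ := A_fold_inv rest e e e e 0 0 0 0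
  rw [h]
  norm_num

-- ===== VERDICT (by name: the statement is the Claim_ definition above) =====
theorem maior_menor_trocas_spec : Claim_equal_maior_menor_trocas := by
  intro elements _ hpre
  unfold Spec_maior_menor_trocas
  match elements with
  | [] => exact absurd rfl hpre
  | e :: rest => rw [A_closed, B_closed]
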